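-- pv_equiv track=rewrite | github.com/finckenstein/KitchenToolsKB | knowledge_base/eval_utensil_used_for.py | get_top_5
-- ===== SOURCE A (Python) =====
-- def get_top_5(sorted_v):
--     if len(sorted_v) == 0:
--         return {}
--
--     maxi = list(sorted_v.values())[0]
--     counter = 0
--     top_5_dict = {}
--
--     for elem in sorted_v:
--         score = sorted_v[elem]
--
--         if maxi != score:
--             counter += 1
--             maxi = sorted_v[elem]
--
--         if counter == 5:
--             break
--         else:
--             top_5_dict[elem] = sorted_v[elem]
--     return top_5_dict
-- ===== SOURCE B (Python) =====
-- def get_top_5(sorted_v):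
--     runs = []
--     cur = []
--     for k, v in sorted_v.items():
--         if cur and cur[0][1] != v:
--             runs.append(cur)
--             cur = []
--         cur.append((k, v))
--     if cur:
--         runs.append(cur)
--     return dict(kv for run in runs[:5] for kv in run)
-- ===== Notes on version B (the rewrite author's own statement) =====
-- stated objective: alternative
-- what changed: Replaced the transition-counting single loop with break by a two-phase run-grouping: group consecutive equal-score entries into runs, keep the first 5 runs, and build the dict from their flattened members.
import Mathlib
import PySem

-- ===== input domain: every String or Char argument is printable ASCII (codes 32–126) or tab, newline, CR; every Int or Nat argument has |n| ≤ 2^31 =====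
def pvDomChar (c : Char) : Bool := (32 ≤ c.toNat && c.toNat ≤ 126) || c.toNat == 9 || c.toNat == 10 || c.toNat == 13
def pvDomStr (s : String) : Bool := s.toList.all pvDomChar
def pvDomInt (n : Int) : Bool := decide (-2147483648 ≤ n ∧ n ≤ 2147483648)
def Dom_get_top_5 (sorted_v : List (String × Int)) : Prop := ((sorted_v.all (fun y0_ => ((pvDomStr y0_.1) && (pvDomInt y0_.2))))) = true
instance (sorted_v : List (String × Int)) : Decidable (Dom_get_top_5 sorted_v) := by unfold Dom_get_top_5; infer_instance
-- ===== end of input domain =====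

-- B groups consecutive equal-score runs and keeps the first 5 runs, instead of A's
-- transition-counting loop with break; same cost, different decomposition (objective: alternative).

-- ===== PORT A =====
-- dict lookup d[k] on an assoc list with distinct keys (Pre_): first match; exact dict semantics.
-- The default 0 of the [] case is never reached: every looked-up key is a key of the list.
def pyLookup : List (String × Int) → String → Int
  | [], _ => 0
  | (k, v) :: rest, key => if k = key then v else pyLookup rest key

-- dict assignment d[k] = v: overwrite in place, new keys append; exact dict semantics.
def pyDictSet : List (String × Int) → String → Int → List (String × Int)
  | [], k, v => [(k, v)]
  | (k', v') :: rest, k, v => if k' = k then (k, v) :: rest else (k', v') :: pyDictSet rest k v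

-- the for-loop of A with its early break; state = (maxi, counter, top_5_dict)
def getTop5Loop (full : List (String × Int)) : List (String × Int) → Int → Int → List (String × Int) → List (String × Int)
  | [], _, _, d => d
  | (k, _) :: rest, maxi, counter, d =>
      let score := pyLookup full k
      let counter := if maxi ≠ score then counter + 1 else counter
      let maxi := if maxi ≠ score then pyLookup full k else maxi
      if counter = 5 then d
      else getTop5Loop full rest maxi counter (pyDictSet d k (pyLookup full k))

def get_top_5 (sorted_v : List (String × Int)) : List (String × Int) :=
  if sorted_v.length = 0 then []
  else
    let maxi := (PySem.List.pyGet? (sorted_v.map Prod.snd) 0).getD 0  -- list(sorted_v.values())[0]; list nonempty, so the index is in range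
    getTop5Loop sorted_v sorted_v maxi 0 []

-- ===== PORT B =====
-- one step of B's run-grouping loop: flush the current run when the score changes, then append
def runStep (p : List (List (String × Int)) × List (String × Int)) (kv : String × Int) :
    List (List (String × Int)) × List (String × Int) :=
  let p := if p.2 ≠ [] ∧ ((p.2.headD kv).2 ≠ kv.2) then (p.1 ++ [p.2], ([] : List (String × Int))) else p
  (p.1, p.2 ++ [kv])

def get_top_5_alt (sorted_v : List (String × Int)) : List (String × Int) :=
  let st := sorted_v.foldl runStep ([], [])
  let runs := if st.2 ≠ [] then st.1 ++ [st.2] else st.1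
  -- dict(kv for run in runs[:5] for kv in run)
  ((PySem.List.slice runs (some 0) (some 5)).flatMap id).foldl (fun d kv => pyDictSet d kv.1 kv.2) []

-- ===== PRECONDITION & SPEC =====
-- Pre_ requires distinct keys: the Python argument is a dict, which cannot hold duplicate keys,
-- so an assoc list with duplicate keys does not encode any actual input of A.
def Pre_get_top_5 (sorted_v : List (String × Int)) : Prop := (sorted_v.map Prod.fst).Nodup
instance (sorted_v : List (String × Int)) : Decidable (Pre_get_top_5 sorted_v) := by unfold Pre_get_top_5; infer_instance
def pvWitness_get_top_5 : (List (String × Int)) := [("a", 3), ("b", 2), ("c", 2)]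
def Spec_get_top_5 (sorted_v : List (String × Int)) (out : List (String × Int)) : Prop := out = get_top_5_alt sorted_v
instance (sorted_v : List (String × Int)) (out : List (String × Int)) : Decidable (Spec_get_top_5 sorted_v out) := by unfold Spec_get_top_5; infer_instance

-- ===== CLAIM (what is proved, stated in full; the proofs are below) =====
def Claim_equal_get_top_5 : Prop := ∀ (sorted_v : List (String × Int)), Dom_get_top_5 sorted_v → Pre_get_top_5 sorted_v → Spec_get_top_5 sorted_v (get_top_5 sorted_v)

-- ===== LEMMAS AND PROOFS =====

-- reference: split off the leading run of score v (takeWhile/dropWhile pair)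
def splitRun (v : Int) (l : List (String × Int)) : List (String × Int) × List (String × Int) :=
  (l.takeWhile (fun x => x.2 == v), l.dropWhile (fun x => x.2 == v))

-- reference: the first n consecutive-equal-score runs, flattened
def takeRuns : Nat → List (String × Int) → List (String × Int)
  | 0, _ => []
  | _ + 1, [] => []
  | n + 1, x :: xs => x :: (splitRun x.2 xs).1 ++ takeRuns n (splitRun x.2 xs).2
termination_by n l => l.length
decreasing_by
  simp only [splitRun, List.length_cons]
  exact Nat.lt_succ_of_le (List.length_dropWhile_le _ _)

-- reference: the list of runs
def runsOf : List (String × Int) → List (List (String × Int))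
  | [] => []
  | x :: xs => (x :: (splitRun x.2 xs).1) :: runsOf (splitRun x.2 xs).2
termination_by l => l.length
decreasing_by
  simp only [splitRun, List.length_cons]
  exact Nat.lt_succ_of_le (List.length_dropWhile_le _ _)

theorem takeRuns_nil (n : Nat) : takeRuns n [] = [] := by
  cases n <;> simp [takeRuns]

theorem pyLookup_eq {full : List (String × Int)} (h : (full.map Prod.fst).Nodup) :
    ∀ p ∈ full, pyLookup full p.1 = p.2 := by
  induction full with
  | nil => intro p hp; cases hp
  | cons q rest ih =>
    simp only [List.map_cons, List.nodup_cons, List.mem_map] at h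
    intro p hp
    simp only [List.mem_cons] at hp
    rcases hp with hp | hp
    · subst hp; simp [pyLookup]
    · have hne : q.1 ≠ p.1 := by
        intro he; exact h.1 ⟨p, hp, he.symm⟩
      simpa [pyLookup, hne] using ih h.2 p hp

theorem pyDictSet_append {d : List (String × Int)} {k : String} (v : Int)
    (h : k ∉ d.map Prod.fst) : pyDictSet d k v = d ++ [(k, v)] := by
  induction d with
  | nil => simp [pyDictSet]
  | cons q rest ih =>
    simp only [List.map_cons, List.mem_cons] at h
    simp only [not_or] at h
    simp [pyDictSet, Ne.symm h.1, ih h.2]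

theorem foldl_pyDictSet_append {l d : List (String × Int)}
    (hn : (l.map Prod.fst).Nodup) (hdisj : ∀ k ∈ l.map Prod.fst, k ∉ d.map Prod.fst) :
    l.foldl (fun d kv => pyDictSet d kv.1 kv.2) d = d ++ l := by
  induction l generalizing d with
  | nil => simp
  | cons x rest ih =>
    simp only [List.map_cons, List.nodup_cons] at hn
    have hx : x.1 ∉ d.map Prod.fst := hdisj x.1 (by simp)
    have hdisj' : ∀ k ∈ rest.map Prod.fst, k ∉ (d ++ [x]).map Prod.fst := by
      intro k hk
      simp only [List.map_append, List.mem_append, List.map_cons, List.map_nil,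
        List.mem_singleton]
      rintro (h | h)
      · exact hdisj k (by simp [hk]) h
      · exact hn.1 (h ▸ hk)
    calc (x :: rest).foldl (fun d kv => pyDictSet d kv.1 kv.2) d
        = rest.foldl (fun d kv => pyDictSet d kv.1 kv.2) (d ++ [x]) := by
          simp [pyDictSet_append x.2 hx]
      _ = d ++ [x] ++ rest := ih hn.2 hdisj'
      _ = d ++ x :: rest := by simp

theorem takeRuns_sublist : ∀ (n : Nat) (l : List (String × Int)), List.Sublist (takeRuns n l) l := by
  intro n l
  fun_induction takeRuns n l with
  | case1 => simp
  | case2 => simp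
  | case3 n x xs ih =>
    refine List.Sublist.cons₂ x ?_
    have h1 : List.Sublist ((splitRun x.2 xs).1 ++ takeRuns n (splitRun x.2 xs).2)
        ((splitRun x.2 xs).1 ++ (splitRun x.2 xs).2) := (ih).append_left _
    have h2 : (splitRun x.2 xs).1 ++ (splitRun x.2 xs).2 = xs := by simp [splitRun]
    have h3 : List.Sublist ((splitRun x.2 xs).1 ++ (splitRun x.2 xs).2) xs := by
      rw [h2]
    exact h1.trans h3

-- A's loop produces the current run of maxi, then the remaining allowed runs
theorem getTop5Loop_eq (full : List (String × Int)) :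
    ∀ (rest : List (String × Int)) (maxi c : Int) (d : List (String × Int)),
    (∀ p ∈ rest, pyLookup full p.1 = p.2) →
    (rest.map Prod.fst).Nodup →
    (∀ k ∈ rest.map Prod.fst, k ∉ d.map Prod.fst) →
    0 ≤ c → c < 5 →
    getTop5Loop full rest maxi c d = d ++ (splitRun maxi rest).1 ++ takeRuns (4 - c.toNat) (splitRun maxi rest).2 := by
  intro rest
  induction rest with
  | nil => intro maxi c d _ _ _ _ _; simp [getTop5Loop, splitRun, takeRuns_nil]
  | cons x xs ih =>
    intro maxi c d hlook hn hdisj hc0 hc5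
    have hx : pyLookup full x.1 = x.2 := hlook x (by simp)
    simp only [List.map_cons, List.nodup_cons] at hn
    have hxd : x.1 ∉ d.map Prod.fst := hdisj x.1 (by simp)
    have hdisj' : ∀ k ∈ xs.map Prod.fst, k ∉ (pyDictSet d x.1 x.2).map Prod.fst := by
      intro k hk
      rw [pyDictSet_append x.2 hxd]
      simp only [List.map_append, List.mem_append, List.map_cons, List.map_nil,
        List.mem_singleton]
      rintro (h | h)
      · exact hdisj k (by simp [hk]) h
      · exact hn.1 (h ▸ hk)
    by_cases hm : maxi = x.2
    · -- same run: counter unchanged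
      subst hm
      have hc : ¬ (c = 5) := by omega
      have hstep : getTop5Loop full (x :: xs) x.2 c d
          = getTop5Loop full xs x.2 c (pyDictSet d x.1 x.2) := by
        obtain ⟨k, v⟩ := x
        simp only at hx
        simp [getTop5Loop, hx, hc]
      rw [hstep, ih x.2 c _ (fun p hp => hlook p (by simp [hp])) hn.2 hdisj' hc0 hc5,
        pyDictSet_append x.2 hxd]
      simp [splitRun, List.append_assoc]
    · -- new run: counter increments
      have hm' : ¬ (x.2 = maxi) := fun h => hm h.symm
      by_cases h5 : c + 1 = 5
      · have hstep : getTop5Loop full (x :: xs) maxi c d = d := by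
          obtain ⟨k, v⟩ := x
          simp only at hx hm
          simp [getTop5Loop, hx, hm, h5]
        rw [hstep]
        have hc4 : c.toNat = 4 := by omega
        simp [splitRun, hm', hc4, takeRuns]
      · have hstep : getTop5Loop full (x :: xs) maxi c d
            = getTop5Loop full xs x.2 (c + 1) (pyDictSet d x.1 x.2) := by
          obtain ⟨k, v⟩ := x
          simp only at hx hm
          simp [getTop5Loop, hx, hm, h5]
        have hc5' : c + 1 < 5 := by omega
        rw [hstep, ih x.2 (c + 1) _ (fun p hp => hlook p (by simp [hp])) hn.2 hdisj' (by omega) hc5',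
          pyDictSet_append x.2 hxd]
        have hnat : 4 - c.toNat = (4 - (c + 1).toNat) + 1 := by omega
        simp only [splitRun, List.takeWhile_cons, List.dropWhile_cons, beq_iff_eq,
          if_neg hm']
        rw [hnat]
        simp [takeRuns, splitRun, List.append_assoc]

theorem get_top_5_eq_takeRuns (sorted_v : List (String × Int))
    (h : (sorted_v.map Prod.fst).Nodup) : get_top_5 sorted_v = takeRuns 5 sorted_v := by
  cases sorted_v with
  | nil => simp [get_top_5, takeRuns]
  | cons x xs =>
    have hmax : (PySem.List.pyGet? ((x :: xs).map Prod.snd) 0).getD 0 = x.2 := by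
      simp
    simp only [get_top_5, List.length_cons, if_neg (by omega : ¬ (xs.length + 1 = 0)), hmax]
    rw [getTop5Loop_eq (x :: xs) (x :: xs) x.2 0 [] (pyLookup_eq h) h (by simp) (by norm_num) (by norm_num)]
    have : (5 : Nat) = 4 + 1 := rfl
    simp [takeRuns, splitRun, Int.toNat_zero]

-- B's fold builds exactly the run decomposition
def finishRuns (st : List (List (String × Int)) × List (String × Int)) : List (List (String × Int)) :=
  if st.2 ≠ [] then st.1 ++ [st.2] else st.1

theorem foldl_runStep_eq :
    ∀ (l : List (String × Int)) (runs : List (List (String × Int))) (c0 : String × Int) (cs : List (String × Int)),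
    finishRuns (l.foldl runStep (runs, c0 :: cs))
    = (runs ++ [(c0 :: cs) ++ (splitRun c0.2 l).1]) ++ runsOf (splitRun c0.2 l).2 := by
  intro l
  induction l with
  | nil => intro runs c0 cs; simp [finishRuns, splitRun, runsOf]
  | cons x xs ih =>
    intro runs c0 cs
    by_cases hm : x.2 = c0.2
    · have hstep : runStep (runs, c0 :: cs) x = (runs, c0 :: (cs ++ [x])) := by
        simp [runStep, hm]
      simp only [List.foldl_cons, hstep, ih]
      simp [splitRun, hm, List.append_assoc]
    · have hstep : runStep (runs, c0 :: cs) x = (runs ++ [c0 :: cs], [x]) := by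
        simp [runStep, Ne.symm hm]
      simp only [List.foldl_cons, hstep]
      rw [ih (runs ++ [c0 :: cs]) x []]
      have hsplit : (splitRun c0.2 (x :: xs)) = ([], x :: xs) := by
        simp [splitRun, hm]
      rw [hsplit]
      simp [runsOf, List.append_assoc]

theorem flatten_take_runsOf : ∀ (n : Nat) (l : List (String × Int)),
    (((runsOf l).take n).flatMap id) = takeRuns n l := by
  intro n
  induction n with
  | zero => intro l; simp [takeRuns]
  | succ n ih =>
    intro l
    cases l with
    | nil => simp [runsOf, takeRuns]
    | cons x xs =>
      rw [runsOf]
      simp only [List.take_succ_cons, List.flatMap_cons, id]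
      rw [ih]
      simp [takeRuns]

theorem get_top_5_alt_eq_takeRuns (sorted_v : List (String × Int))
    (h : (sorted_v.map Prod.fst).Nodup) : get_top_5_alt sorted_v = takeRuns 5 sorted_v := by
  have hruns : finishRuns (sorted_v.foldl runStep (([] : List (List (String × Int))), ([] : List (String × Int))))
      = runsOf sorted_v := by
    cases sorted_v with
    | nil => simp [finishRuns, runsOf]
    | cons x xs =>
      have hstep : runStep ([], []) x = ([], [x]) := by simp [runStep]
      simp only [List.foldl_cons, hstep]
      rw [foldl_runStep_eq xs [] x []]
      rw [runsOf]
      simp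
  have hsub := (takeRuns_sublist 5 sorted_v).map Prod.fst
  have hnod : ((takeRuns 5 sorted_v).map Prod.fst).Nodup := h.sublist hsub
  show (((PySem.List.slice (finishRuns (sorted_v.foldl runStep ([], []))) (some 0) (some 5)).flatMap id).foldl
      (fun d kv => pyDictSet d kv.1 kv.2) []) = takeRuns 5 sorted_v
  rw [hruns]
  rw [PySem.List.slice_toNat _ (by norm_num) (by norm_num)]
  have h50 : ((5 : Int).toNat - (0 : Int).toNat) = 5 := rfl
  have h00 : (0 : Int).toNat = 0 := rfl
  rw [h50, h00, List.drop_zero, flatten_take_runsOf 5 sorted_v]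
  rw [foldl_pyDictSet_append hnod (by simp)]
  simp

-- ===== VERDICT (by name: the statement is the Claim_ definition above) =====
theorem get_top_5_spec : Claim_equal_get_top_5 := by
  intro sorted_v _ hpre
  unfold Spec_get_top_5
  rw [get_top_5_eq_takeRuns sorted_v hpre, get_top_5_alt_eq_takeRuns sorted_v hpre]
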